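-- pv_equiv track=rewrite | github.com/SameerJain/CodepathTP101 | unit_4_two_pointer_technique/session1_6_24/pset_2.py | make_palindrome0
-- ===== SOURCE A (Python) =====
-- def make_palindrome0(s):
--     left, right = 0, len(s) - 1
--     new_str = list(s)
--     while left < right:
--         smaller_val = chr(min(ord(s[left]),ord(s[right])))
--         new_str[left], new_str[right] = smaller_val, smaller_val
--         left += 1
--         right -= 1
--
--     return ''.join(new_str)
-- ===== SOURCE B (Python) =====
-- def make_palindrome0(s):
--     n = len(s)
--     return ''.join(min(s[i], s[n - 1 - i]) for i in range(n))
-- ===== Notes on version B (the rewrite author's own statement) =====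
-- stated objective: simpler
-- what changed: Replaces the half-range two-pointer loop that mutates a char list in place with a single comprehension over all indices computing each output character independently as min(s[i], s[n-1-i]).
import Mathlib
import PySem

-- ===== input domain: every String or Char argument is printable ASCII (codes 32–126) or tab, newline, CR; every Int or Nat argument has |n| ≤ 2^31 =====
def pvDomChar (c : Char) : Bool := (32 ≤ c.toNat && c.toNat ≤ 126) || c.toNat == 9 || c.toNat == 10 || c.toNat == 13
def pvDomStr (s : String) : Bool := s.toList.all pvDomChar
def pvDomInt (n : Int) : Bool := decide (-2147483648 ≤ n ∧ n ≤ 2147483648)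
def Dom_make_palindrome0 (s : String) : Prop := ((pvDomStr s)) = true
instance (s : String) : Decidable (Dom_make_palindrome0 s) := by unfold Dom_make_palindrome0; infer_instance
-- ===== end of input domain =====

-- B replaces A's in-place two-pointer loop by one full-index pass computing each output
-- character independently as min(s[i], s[n-1-i]); objective: simpler, same cost.


-- ===== PORT A =====
-- the while loop of A: state (left, right, new_str); indices are always in range
-- while the loop runs (0 ≤ left < right ≤ len s - 1), so getD's default is never used.
def pvLoopA (s : List Char) (left right : Nat) (ns : List Char) : List Char :=
  if left < right then
    let smaller_val := Char.ofNat (min (s.getD left ' ').toNat (s.getD right ' ').toNat)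
    pvLoopA s (left + 1) (right - 1) ((ns.set left smaller_val).set right smaller_val)
  else ns
termination_by right - left

def make_palindrome0 (s : String) : String :=
  String.ofList (pvLoopA s.toList 0 (s.toList.length - 1) s.toList)

-- ===== PORT B =====
def make_palindrome0_alt (s : String) : String :=
  let cs := s.toList
  let n := cs.length
  String.ofList ((List.range n).map (fun i => min (cs.getD i ' ') (cs.getD (n - 1 - i) ' ')))

-- ===== PRECONDITION & SPEC =====
def Spec_make_palindrome0 (s : String) (out : String) : Prop := out = make_palindrome0_alt s
instance (s : String) (out : String) : Decidable (Spec_make_palindrome0 s out) := by unfold Spec_make_palindrome0; infer_instance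

-- ===== CLAIM (what is proved, stated in full; the proofs are below) =====
def Claim_equal_make_palindrome0 : Prop := ∀ (s : String), Dom_make_palindrome0 s → Spec_make_palindrome0 s (make_palindrome0 s)

-- ===== LEMMAS AND PROOFS =====

-- Python's chr(min(ord a, ord b)) is the smaller character.
theorem pvMinChar (a b : Char) : Char.ofNat (min a.toNat b.toNat) = min a b := by
  rcases le_total a b with h | h
  · have h' : a.toNat ≤ b.toNat := Fin.mk_le_mk.mp h
    rw [min_eq_left h', min_eq_left h, Char.ofNat_toNat]
  · have h' : b.toNat ≤ a.toNat := Fin.mk_le_mk.mp h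
    rw [min_eq_right h', min_eq_right h, Char.ofNat_toNat]

theorem pvLoopA_length (s : List Char) (left right : Nat) (ns : List Char) :
    (pvLoopA s left right ns).length = ns.length := by
  fun_induction pvLoopA s left right ns with
  | case1 left right ns hlr sv ih => simpa using ih
  | case2 => rfl

-- pointwise characterisation of the loop result
theorem pvLoopA_getD (s : List Char) (left right : Nat) (ns : List Char)
    (hlen : ns.length = s.length) (hinv : left + right = s.length - 1)
    (hr : right ≤ s.length - 1)
    (hagree : ∀ i, left ≤ i → i ≤ right → ns.getD i ' ' = s.getD i ' ') :
    ∀ i, (pvLoopA s left right ns).getD i ' ' =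
      if left ≤ i ∧ i ≤ right then
        min (s.getD i ' ') (s.getD (s.length - 1 - i) ' ')
      else ns.getD i ' ' := by
  fun_induction pvLoopA s left right ns with
  | case1 left right ns hlr sv ih =>
    intro i
    have hsv : sv = min (s.getD left ' ') (s.getD right ' ') := pvMinChar _ _
    have hrlt : right < ns.length := by omega
    have hllt : left < ns.length := by omega
    have hsetD : ∀ j, ((ns.set left sv).set right sv).getD j ' ' =
        if j = right then sv else if j = left then sv else ns.getD j ' ' := by
      intro j
      by_cases hjr : j = right
      · simp [List.getD, hjr, hrlt]
      · by_cases hjl : j = left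
        · simp [List.getD, hjl, hllt,
            (show right ≠ left by omega)]
        · simp [List.getD, hjr, hjl, Ne.symm hjr, Ne.symm hjl]
    have hlenS : ((ns.set left sv).set right sv).length = s.length := by
      simpa using hlen
    have hinv' : (left + 1) + (right - 1) = s.length - 1 := by omega
    have hr' : right - 1 ≤ s.length - 1 := by omega
    have hagree' : ∀ j, left + 1 ≤ j → j ≤ right - 1 →
        ((ns.set left sv).set right sv).getD j ' ' = s.getD j ' ' := by
      intro j h1 h2
      rw [hsetD j, if_neg (by omega), if_neg (by omega)]
      exact hagree j (by omega) (by omega)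
    rw [ih hlenS hinv' hr' hagree' i]
    by_cases h1 : left + 1 ≤ i ∧ i ≤ right - 1
    · rw [if_pos h1, if_pos (by omega)]
    · rw [if_neg h1, hsetD i]
      by_cases h2 : left ≤ i ∧ i ≤ right
      · rw [if_pos h2]
        have hcase : i = left ∨ i = right := by omega
        rcases hcase with rfl | rfl
        · have hmir : s.length - 1 - i = right := by omega
          rw [if_neg (by omega), if_pos rfl, hsv, hmir]
        · have hmir : s.length - 1 - i = left := by omega
          rw [if_pos rfl, hsv, hmir, min_comm]
      · rw [if_neg h2, if_neg (by omega), if_neg (by omega)]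
  | case2 left right ns hlr =>
    intro i
    by_cases h : left ≤ i ∧ i ≤ right
    · rw [if_pos h]
      have hmir : s.length - 1 - i = i := by omega
      rw [hmir, min_self]
      exact hagree i h.1 h.2
    · rw [if_neg h]

-- ===== VERDICT (by name: the statement is the Claim_ definition above) =====
theorem make_palindrome0_spec : Claim_equal_make_palindrome0 := by
  intro s _
  unfold Spec_make_palindrome0 make_palindrome0 make_palindrome0_alt
  set cs := s.toList with hcs
  rcases Nat.eq_zero_or_pos cs.length with h0 | hpos
  · have : cs = [] := List.eq_nil_of_length_eq_zero h0
    simp [this, pvLoopA]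
  · congr 1
    have hlen : (pvLoopA cs 0 (cs.length - 1) cs).length = cs.length :=
      pvLoopA_length _ _ _ _
    apply List.ext_getElem
    · simp [hlen]
    · intro i hi hi'
      have hilen : i < cs.length := by rw [hlen] at hi; exact hi
      have hchar := pvLoopA_getD cs 0 (cs.length - 1) cs rfl (by omega) (by omega)
        (fun _ _ _ => rfl) i
      rw [if_pos (by omega)] at hchar
      have hL : (pvLoopA cs 0 (cs.length - 1) cs).getD i ' ' =
          (pvLoopA cs 0 (cs.length - 1) cs)[i] := by
        simp [List.getD, List.getElem?_eq_getElem hi]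
      have hR : ((List.range cs.length).map
          (fun i => min (cs.getD i ' ') (cs.getD (cs.length - 1 - i) ' ')))[i]'hi'
          = min (cs.getD i ' ') (cs.getD (cs.length - 1 - i) ' ') := by
        simp
      rw [hR, ← hL, hchar]
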